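-- pv_equiv track=rewrite | github.com/alecsudit/Practice-Projects | big_book_of_small_python_projects/birthday_paradox.py | checkMatch
-- ===== SOURCE A (Python) =====
-- def checkMatch(x):
--     matches = []
--     # set(birthdays) will eliminate duplicates, which are matches in this instance
--     if len(x) == len(set(x)):
--         return None
--     # run through list of birthdays and find the duplicates
--     for a, birthdayA in enumerate(x):
--         for b, birthdayB in enumerate(x[a+1 :]):
--             if birthdayA == birthdayB:
--                 matches.append(birthdayA)
--     return matches
-- ===== SOURCE B (Python) =====
-- def checkMatch(x):
--     # One pass with a count table: each value contributes itself once per later equal element.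
--     remaining = {}
--     for v in x:
--         remaining[v] = remaining.get(v, 0) + 1
--     out = []
--     for v in x:
--         remaining[v] -= 1
--         out.extend([v] * remaining[v])
--     return out if out else None
-- ===== Notes on version B (the rewrite author's own statement) =====
-- stated objective: alternative
-- what changed: replaces the quadratic nested index loops by one pass over a count table: each element emits itself once per remaining equal element, so the inner scan disappears (cost is then dominated by the output length L, which can itself be quadratic)
import Mathlib
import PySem

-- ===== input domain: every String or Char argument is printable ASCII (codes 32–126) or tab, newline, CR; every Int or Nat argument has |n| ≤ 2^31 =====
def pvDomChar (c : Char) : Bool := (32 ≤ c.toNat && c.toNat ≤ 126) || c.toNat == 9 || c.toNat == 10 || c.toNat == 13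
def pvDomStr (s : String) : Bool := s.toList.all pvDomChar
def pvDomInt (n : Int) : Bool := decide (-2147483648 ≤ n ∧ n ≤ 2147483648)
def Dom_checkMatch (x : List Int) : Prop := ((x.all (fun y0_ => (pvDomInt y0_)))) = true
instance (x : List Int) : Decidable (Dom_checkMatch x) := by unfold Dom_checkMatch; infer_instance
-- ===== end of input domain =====

-- B replaces A's nested index loops by one pass over a count table (alternative algorithm; same value everywhere).

-- ===== PORT A =====
def checkMatch (x : List Int) : Option (List Int) :=
  if x.length = (PySem.Set.ofList x).length then none
  else
    some ((PySem.List.enumerate x).foldl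
      (fun ms p =>
        (PySem.List.enumerate (PySem.List.slice x (some (p.1 + 1)) none)).foldl
          (fun m q => if p.2 == q.2 then m ++ [p.2] else m) ms)
      [])

-- ===== PORT B =====
def checkMatch_alt (x : List Int) : Option (List Int) :=
  let remaining : PySem.Dict Int Int :=
    x.foldl (fun d v => d.insert v (d.getD v 0 + 1)) PySem.Dict.empty
  let st :=
    x.foldl (fun (s : PySem.Dict Int Int × List Int) v =>
      let d := s.1.insert v (s.1.getD v 0 - 1)
      (d, s.2 ++ PySem.List.pyRepeat [v] (d.getD v 0)))
      (remaining, [])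
  if st.2 = [] then none else some st.2

-- ===== PRECONDITION & SPEC =====
def Spec_checkMatch (x : List Int) (out : Option (List Int)) : Prop := out = checkMatch_alt x
instance (x : List Int) (out : Option (List Int)) : Decidable (Spec_checkMatch x out) := by unfold Spec_checkMatch; infer_instance

-- ===== CLAIM (what is proved, stated in full; the proofs are below) =====
def Claim_equal_checkMatch : Prop := ∀ (x : List Int), Dom_checkMatch x → Spec_checkMatch x (checkMatch x)

-- ===== LEMMAS AND PROOFS =====

-- reference result: for each element, one copy per later equal element
def pvDups : List Int → List Int
  | [] => []
  | v :: r => List.replicate (r.count v) v ++ pvDups r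

theorem pvDups_eq_nil_iff (x : List Int) : pvDups x = [] ↔ x.Nodup := by
  induction x with
  | nil => simp [pvDups]
  | cons v r ih =>
    simp [pvDups, List.append_eq_nil_iff, List.replicate_eq_nil_iff, ih,
      List.count_eq_zero, List.nodup_cons, and_comm]

theorem ofList_sublist (x : List Int) : (PySem.Set.ofList x).Sublist x := by
  induction x using List.reverseRecOn with
  | nil => simp [PySem.Set.ofList]
  | append_singleton xs v ih =>
    rw [PySem.Set.ofList_append_singleton, PySem.Set.add_eq_ite]
    split
    · exact ih.trans (List.sublist_append_left xs [v])
    · exact ih.append_right [v]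

theorem len_ofList_iff (x : List Int) :
    x.length = (PySem.Set.ofList x).length ↔ x.Nodup := by
  constructor
  · intro h
    have := (ofList_sublist x).eq_of_length h.symm
    rw [← this]; exact PySem.Set.nodup_ofList x
  · intro h
    rw [PySem.Set.ofList_eq_self_of_nodup x h]

-- A's inner loop over x[a+1:]
theorem innerA (bA : Int) (l : List Int) (s : Int) (acc : List Int) :
    (PySem.List.enumerate l s).foldl
      (fun m q => if bA == q.2 then m ++ [bA] else m) acc
    = acc ++ List.replicate (l.count bA) bA := by
  induction l generalizing s acc with
  | nil => simp [PySem.List.enumerate_nil]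
  | cons w r ih =>
    rw [PySem.List.enumerate_cons, List.foldl_cons, ih]
    by_cases h : bA = w
    · subst h
      simp [List.count_cons_self, List.append_assoc]
      rw [← List.replicate_succ, List.replicate_succ']
    · simp [h, List.count_cons_of_ne (by simpa using (Ne.symm h) : (w ≠ bA))]

-- A's outer loop, indices k.. over the suffix x.drop k
theorem outerA (x : List Int) (t : List Int) (k : Nat) (ht : x.drop k = t)
    (acc : List Int) :
    (PySem.List.enumerate t (k : Int)).foldl
      (fun ms p =>
        (PySem.List.enumerate (PySem.List.slice x (some (p.1 + 1)) none)).foldl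
          (fun m q => if p.2 == q.2 then m ++ [p.2] else m) ms)
      acc
    = acc ++ pvDups t := by
  induction t generalizing k acc with
  | nil => simp [PySem.List.enumerate_nil, pvDups]
  | cons v r ih =>
    simp only [PySem.List.enumerate_cons, List.foldl_cons]
    have hsl : PySem.List.slice x (some ((k : Int) + 1)) none = r := by
      have : ((k : Int) + 1) = ((k + 1 : Nat) : Int) := by push_cast; ring
      rw [this, PySem.List.slice_from_natCast]
      have : x.drop (k + 1) = (x.drop k).drop 1 := by
        rw [List.drop_drop]
      rw [this, ht]; rfl
    have hr : x.drop (k + 1) = r := by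
      rw [show k + 1 = k + 1 from rfl, ← List.drop_drop, ht]; rfl
    have hk : ((k : Int) + 1) = ((k + 1 : Nat) : Int) := by push_cast; ring
    rw [hsl, innerA, hk, ih (k + 1) hr, pvDups, List.append_assoc]

-- B's emitting loop, under the invariant that the dict holds suffix counts
theorem loopB (t : List Int) (d : PySem.Dict Int Int)
    (hd : ∀ v, d.getD v 0 = (t.count v : Int)) (acc : List Int) :
    (t.foldl (fun (s : PySem.Dict Int Int × List Int) v =>
      let d' := s.1.insert v (s.1.getD v 0 - 1)
      (d', s.2 ++ PySem.List.pyRepeat [v] (d'.getD v 0))) (d, acc)).2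
    = acc ++ pvDups t := by
  induction t generalizing d acc with
  | nil => simp [pvDups]
  | cons v r ih =>
    rw [List.foldl_cons]
    simp only
    have hv : d.getD v 0 - 1 = (r.count v : Int) := by
      have := hd v
      rw [this, List.count_cons_self]; push_cast; ring
    rw [PySem.Dict.getD_insert_self, hv, PySem.List.pyRepeat_singleton,
      Int.toNat_natCast]
    have hinv : ∀ w, ((d.insert v ((r.count v : Int))).getD w 0) = (r.count w : Int) := by
      intro w
      by_cases hw : w = v
      · subst hw; simp [PySem.Dict.getD_insert_self]
      · simp [PySem.Dict.getD_insert, hw, hd w, Ne.symm hw]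
    rw [ih _ hinv, pvDups, List.append_assoc]

theorem altB (x : List Int) :
    checkMatch_alt x = if pvDups x = [] then none else some (pvDups x) := by
  unfold checkMatch_alt
  rw [PySem.Dict.foldl_insert_getD_add_one_eq_counter]
  have := loopB x (PySem.Dict.counter x)
    (fun v => PySem.Dict.getD_counter x v) []
  simp only [this, List.nil_append]

-- ===== VERDICT (by name: the statement is the Claim_ definition above) =====
theorem checkMatch_spec : Claim_equal_checkMatch := by
  intro x _
  unfold Spec_checkMatch
  rw [altB]
  unfold checkMatch
  by_cases h : x.Nodup
  · rw [if_pos ((len_ofList_iff x).mpr h), if_pos ((pvDups_eq_nil_iff x).mpr h)]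
  · rw [if_neg (fun hl => h ((len_ofList_iff x).mp hl)),
      if_neg (fun hn => h ((pvDups_eq_nil_iff x).mp hn))]
    have := outerA x x 0 rfl []
    simp only [Nat.cast_zero] at this
    rw [this, List.nil_append]
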